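-- pv_equiv track=rewrite | github.com/Ananta0810/Meelody | app/helpers/base/lists.py | findMoved
-- ===== SOURCE A (Python) =====
-- from typing import TypeVar, Callable, final
--
-- T = TypeVar('T')
--
-- def findMoved(originalList: list[T], newList: list[T]) -> (int, int):
--     if len(originalList) != len(newList):
--         return -1, -1  # different length
--
--     diff = [x for x, (c, d) in enumerate(zip(originalList, newList)) if c != d]
--     if not diff:
--         return -1, -1  # equal strings
--     oldIndex, newIndex = diff[0], diff[-1]
--
--     if originalList[oldIndex + 1:newIndex + 1] == newList[oldIndex:newIndex] and originalList[oldIndex] == newList[newIndex]: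
--         return oldIndex, newIndex
--     if originalList[oldIndex:newIndex] == newList[oldIndex + 1:newIndex + 1] and originalList[newIndex] == newList[oldIndex]:
--         return newIndex, oldIndex
--
--     return -1, -1
-- ===== SOURCE B (Python) =====
-- def findMoved(originalList, newList):
--     if len(originalList) != len(newList):
--         return -1, -1
--
--     diff = [x for x, (c, d) in enumerate(zip(originalList, newList)) if c != d]
--     if not diff:
--         return -1, -1
--     oldIndex, newIndex = diff[0], diff[-1]
--
--     forward = list(originalList)
--     forward.insert(newIndex, forward.pop(oldIndex))
--     if forward == newList:
--         return oldIndex, newIndex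
--
--     backward = list(originalList)
--     backward.insert(oldIndex, backward.pop(newIndex))
--     if backward == newList:
--         return newIndex, oldIndex
--
--     return -1, -1
-- ===== Notes on version B (the rewrite author's own statement) =====
-- stated objective: simpler
-- what changed: B keeps the diff-span scan and the guards but verifies the two candidate answers by simulating the move itself (copy the list, pop at one index, insert at the other, compare whole lists) instead of A's paired slice-equality and endpoint checks.
import Mathlib
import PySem

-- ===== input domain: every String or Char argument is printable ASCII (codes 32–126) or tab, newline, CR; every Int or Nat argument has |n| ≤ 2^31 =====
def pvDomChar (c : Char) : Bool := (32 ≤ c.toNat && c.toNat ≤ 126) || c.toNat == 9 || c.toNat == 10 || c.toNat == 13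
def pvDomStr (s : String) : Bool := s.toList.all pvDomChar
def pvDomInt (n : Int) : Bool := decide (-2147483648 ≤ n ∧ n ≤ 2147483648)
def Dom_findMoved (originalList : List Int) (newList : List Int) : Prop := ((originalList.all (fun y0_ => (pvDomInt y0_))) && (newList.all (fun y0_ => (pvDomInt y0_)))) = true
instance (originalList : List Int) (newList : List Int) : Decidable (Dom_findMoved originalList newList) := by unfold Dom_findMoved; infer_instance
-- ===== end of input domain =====

-- B verifies the two candidate branches by simulating the move (copy, pop, insert, compare
-- whole lists) instead of A's slice comparisons; objective: simpler, same cost.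

-- ===== PORT A =====
-- shared by both ports: the identical Python line
-- diff = [x for x, (c, d) in enumerate(zip(originalList, newList)) if c != d]
def pvDiffIdx (originalList : List Int) (newList : List Int) : List Int :=
  ((PySem.List.enumerate (originalList.zip newList)).filter (fun p => p.2.1 != p.2.2)).map (·.1)

def findMoved (originalList : List Int) (newList : List Int) : Int × Int :=
  if originalList.length ≠ newList.length then (-1, -1)
  else
    let diff := pvDiffIdx originalList newList
    if diff = [] then (-1, -1)
    else
      let oldIndex := PySem.List.pyGetD diff 0 (-1)
      let newIndex := PySem.List.pyGetD diff (-1) (-1)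
      if PySem.List.slice originalList (some (oldIndex + 1)) (some (newIndex + 1))
           = PySem.List.slice newList (some oldIndex) (some newIndex)
         ∧ PySem.List.pyGetD originalList oldIndex 0 = PySem.List.pyGetD newList newIndex 0
      then (oldIndex, newIndex)
      else if PySem.List.slice originalList (some oldIndex) (some newIndex)
           = PySem.List.slice newList (some (oldIndex + 1)) (some (newIndex + 1))
         ∧ PySem.List.pyGetD originalList newIndex 0 = PySem.List.pyGetD newList oldIndex 0
      then (newIndex, oldIndex)
      else (-1, -1)

-- ===== PORT B =====
def findMoved_alt (originalList : List Int) (newList : List Int) : Int × Int :=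
  if originalList.length ≠ newList.length then (-1, -1)
  else
    let diff := pvDiffIdx originalList newList
    if diff = [] then (-1, -1)
    else
      let oldIndex := PySem.List.pyGetD diff 0 (-1)
      let newIndex := PySem.List.pyGetD diff (-1) (-1)
      -- forward = list(originalList); forward.insert(newIndex, forward.pop(oldIndex))
      let forward :=
        match PySem.List.pop? originalList oldIndex with
        | some (x, rest) => PySem.List.insert rest newIndex x
        | none => originalList   -- unreachable: oldIndex is a valid index
      if forward = newList then (oldIndex, newIndex)
      else
        let backward :=
          match PySem.List.pop? originalList newIndex with
          | some (x, rest) => PySem.List.insert rest oldIndex x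
          | none => originalList -- unreachable
        if backward = newList then (newIndex, oldIndex)
        else (-1, -1)

-- ===== PRECONDITION & SPEC =====
def Spec_findMoved (originalList : List Int) (newList : List Int) (out : Int × Int) : Prop := out = findMoved_alt originalList newList
instance (originalList : List Int) (newList : List Int) (out : Int × Int) : Decidable (Spec_findMoved originalList newList out) := by unfold Spec_findMoved; infer_instance

-- ===== CLAIM (what is proved, stated in full; the proofs are below) =====
def Claim_equal_findMoved : Prop := ∀ (originalList : List Int) (newList : List Int), Dom_findMoved originalList newList → Spec_findMoved originalList newList (findMoved originalList newList)


-- ===== LEMMAS AND PROOFS =====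

-- diff-index list with a general enumerate start
def pvDg (o n : List Int) (s : Int) : List Int :=
  ((PySem.List.enumerate (o.zip n) s).filter (fun p => p.2.1 != p.2.2)).map (·.1)

theorem pvDg_zero (o n : List Int) : pvDiffIdx o n = pvDg o n 0 := rfl

theorem mem_pvDg {o n : List Int} {s j : Int} :
    j ∈ pvDg o n s ↔ ∃ k : Nat, k < o.length ∧ k < n.length ∧ j = s + k ∧ o.getD k 0 ≠ n.getD k 0 := by
  simp only [pvDg, List.mem_map, List.mem_filter, PySem.List.mem_enumerate_iff]
  constructor
  · rintro ⟨a, ⟨⟨k, hk, rfl⟩, hne⟩, rfl⟩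
    simp only [List.length_zip, lt_min_iff] at hk
    refine ⟨k, hk.1, hk.2, rfl, ?_⟩
    simp only [List.getElem_zip, bne_iff_ne] at hne
    rwa [List.getD_eq_getElem _ _ hk.1, List.getD_eq_getElem _ _ hk.2]
  · rintro ⟨k, h1, h2, rfl, hne⟩
    refine ⟨(s + k, (o.zip n)[k]'(by simp [List.length_zip]; omega)),
      ⟨⟨k, by simp [List.length_zip]; omega, rfl⟩, ?_⟩, rfl⟩
    simp only [List.getElem_zip, bne_iff_ne]
    rwa [List.getD_eq_getElem _ _ h1, List.getD_eq_getElem _ _ h2] at hne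

theorem pvDg_pairwise (o n : List Int) (s : Int) : (pvDg o n s).Pairwise (· < ·) := by
  simp only [pvDg, List.pairwise_map]
  exact (PySem.List.pairwise_lt_enumerate (o.zip n) s).filter _

theorem pv_mem_le_getLast {l : List Int} (hp : l.Pairwise (· < ·)) {j : Int}
    (hj : j ∈ l) (h : l ≠ []) : j ≤ l.getLast h := by
  induction l with
  | nil => simp at hj
  | cons x t ih =>
    cases t with
    | nil => simp at hj; simp [hj]
    | cons y u =>
      rw [List.getLast_cons (by simp)]
      rcases List.mem_cons.mp hj with rfl | hj'
      · have hx : j < (y :: u).getLast (by simp) :=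
          (List.pairwise_cons.mp hp).1 _ (List.getLast_mem _)
        omega
      · exact ih (List.pairwise_cons.mp hp).2 hj' (by simp)

theorem pv_head_le_mem {l : List Int} (hp : l.Pairwise (· < ·)) {j : Int}
    (hj : j ∈ l) (h : l ≠ []) : l.head h ≤ j := by
  cases l with
  | nil => simp at hj
  | cons x t =>
    rcases List.mem_cons.mp hj with rfl | hj'
    · simp
    · have := (List.pairwise_cons.mp hp).1 _ hj'
      simp; omega

theorem pv_take_eq {o n : List Int} {a : Nat} (hlen : o.length = n.length) (ha : a ≤ o.length)
    (h : ∀ i : Nat, i < a → o.getD i 0 = n.getD i 0) : o.take a = n.take a := by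
  apply List.ext_getElem (by simp [hlen])
  intro i h1 h2
  simp only [List.getElem_take]
  have hi : i < a := by simp at h1; omega
  have hio : i < o.length := by omega
  have := h i hi
  rwa [List.getD_eq_getElem o 0 hio, List.getD_eq_getElem n 0 (by omega)] at this

theorem pv_drop_eq {o n : List Int} {b : Nat} (hlen : o.length = n.length)
    (h : ∀ i : Nat, b ≤ i → i < o.length → o.getD i 0 = n.getD i 0) : o.drop b = n.drop b := by
  apply List.ext_getElem (by simp [hlen])
  intro i h1 h2
  simp only [List.getElem_drop]
  have hlt : b + i < o.length := by simp at h1; omega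
  have := h (b + i) (by omega) hlt
  rwa [List.getD_eq_getElem o 0 hlt, List.getD_eq_getElem n 0 (by omega)] at this

-- the list n, decomposed around positions [a, a+m] with the moved element at the right end
theorem pv_decomp_fwd_iff {n : List Int} {a m : Nat} (X Y : List Int) (x y : Int) (S : List Int)
    (hX : X.length = m) (hY : Y.length = m) (hn : n = n.take a ++ (Y ++ y :: S)) :
    ((n.take a ++ X) ++ x :: S = n ↔ (X = Y ∧ x = y)) := by
  constructor
  · intro h
    rw [List.append_assoc] at h
    conv_rhs at h => rw [hn]
    have h' := (List.append_right_inj (n.take a)).mp h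
    obtain ⟨h1, h2⟩ := List.append_inj h' (by omega)
    exact ⟨h1, by simpa using h2⟩
  · rintro ⟨rfl, rfl⟩
    rw [List.append_assoc]
    exact hn.symm

-- same, with the moved element at the left end
theorem pv_decomp_bwd_iff {n : List Int} {a m : Nat} (X Y : List Int) (x y : Int) (S : List Int)
    (hX : X.length = m) (hY : Y.length = m) (hn : n = n.take a ++ y :: (Y ++ S)) :
    (n.take a ++ x :: (X ++ S) = n ↔ (X = Y ∧ x = y)) := by
  constructor
  · intro h
    conv_rhs at h => rw [hn]
    have h' := (List.append_right_inj (n.take a)).mp h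
    rw [List.cons_eq_cons] at h'
    obtain ⟨h2, h1⟩ := h'
    obtain ⟨h1, -⟩ := List.append_inj h1 (by omega)
    exact ⟨h1, h2⟩
  · rintro ⟨rfl, rfl⟩
    exact hn.symm

-- forward move (pop at a, insert at b) equals newList  ↔  A's first slice condition
theorem pv_move_fwd_iff {o n : List Int} {a b : Nat} (hlen : o.length = n.length)
    (hab : a ≤ b) (hb : b < o.length)
    (pref : o.take a = n.take a) (suff : o.drop (b + 1) = n.drop (b + 1)) :
    ((o.eraseIdx a).take b ++ o.getD a 0 :: (o.eraseIdx a).drop b = n ↔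
      ((o.drop (a + 1)).take (b - a) = (n.drop a).take (b - a) ∧
        o.getD a 0 = n.getD b 0)) := by
  have ha : a < o.length := by omega
  have hbn : b < n.length := by omega
  have hta : (o.take a).length = a := by simp; omega
  have e1 : (o.eraseIdx a).take b = o.take a ++ (o.drop (a + 1)).take (b - a) := by
    rw [List.eraseIdx_eq_take_drop_succ, List.take_append, hta, List.take_take,
      Nat.min_eq_right hab]
  have e2 : (o.eraseIdx a).drop b = o.drop (b + 1) := by
    rw [List.eraseIdx_eq_take_drop_succ, List.drop_append, hta,
      List.drop_eq_nil_of_le (by simp; omega), List.nil_append, List.drop_drop]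
    congr 1
    omega
  have hba : (a + 1) + (b - a) = b + 1 := by omega
  have hb' : a + (b - a) = b := by omega
  have en : n = n.take a ++ ((n.drop a).take (b - a) ++ n.getD b 0 :: n.drop (b + 1)) := by
    calc n = n.take a ++ n.drop a := (List.take_append_drop a n).symm
    _ = n.take a ++ ((n.drop a).take (b - a) ++ (n.drop a).drop (b - a)) := by
        congr 1
        rw [List.take_append_drop]
    _ = n.take a ++ ((n.drop a).take (b - a) ++ n.getD b 0 :: n.drop (b + 1)) := by
        rw [List.drop_drop, hb', List.drop_eq_getElem_cons hbn, List.getD_eq_getElem n 0 hbn]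
  rw [e1, e2, pref, suff]
  exact pv_decomp_fwd_iff (m := b - a) _ _ _ _ _ (by simp; omega) (by simp; omega) en

-- backward move (pop at b, insert at a) equals newList  ↔  A's second slice condition
theorem pv_move_bwd_iff {o n : List Int} {a b : Nat} (hlen : o.length = n.length)
    (hab : a ≤ b) (hb : b < o.length)
    (pref : o.take a = n.take a) (suff : o.drop (b + 1) = n.drop (b + 1)) :
    ((o.eraseIdx b).take a ++ o.getD b 0 :: (o.eraseIdx b).drop a = n ↔
      ((o.drop a).take (b - a) = (n.drop (a + 1)).take (b - a) ∧
        o.getD b 0 = n.getD a 0)) := by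
  have ha : a < o.length := by omega
  have han : a < n.length := by omega
  have htb : (o.take b).length = b := by simp; omega
  have e1 : (o.eraseIdx b).take a = o.take a := by
    rw [List.eraseIdx_eq_take_drop_succ, List.take_append, htb, List.take_take,
      Nat.min_eq_left hab, Nat.sub_eq_zero_of_le hab, List.take_zero, List.append_nil]
  have e2 : (o.eraseIdx b).drop a = (o.drop a).take (b - a) ++ o.drop (b + 1) := by
    rw [List.eraseIdx_eq_take_drop_succ, List.drop_append, htb,
      Nat.sub_eq_zero_of_le hab, List.drop_zero, List.drop_take]
  have hb' : (a + 1) + (b - a) = b + 1 := by omega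
  have en : n = n.take a ++ n.getD a 0 :: ((n.drop (a + 1)).take (b - a) ++ n.drop (b + 1)) := by
    calc n = n.take a ++ n.drop a := (List.take_append_drop a n).symm
    _ = n.take a ++ n.getD a 0 :: n.drop (a + 1) := by
        rw [List.drop_eq_getElem_cons han, List.getD_eq_getElem n 0 han]
    _ = n.take a ++ n.getD a 0 ::
          ((n.drop (a + 1)).take (b - a) ++ (n.drop (a + 1)).drop (b - a)) := by
        congr 2
        rw [List.take_append_drop]
    _ = n.take a ++ n.getD a 0 :: ((n.drop (a + 1)).take (b - a) ++ n.drop (b + 1)) := by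
        rw [List.drop_drop, hb']
  rw [e1, e2, pref, suff]
  exact pv_decomp_bwd_iff (m := b - a) _ _ _ _ _ (by simp; omega) (by simp; omega) en

theorem pv_pyGetD_zero_head {l : List Int} (h : l ≠ []) (d : Int) :
    PySem.List.pyGetD l 0 d = l.head h := by
  cases l with
  | nil => exact absurd rfl h
  | cons x t => rw [PySem.List.pyGetD_zero_cons, List.head_cons]

-- the two ports agree
theorem pv_main (o n : List Int) : findMoved o n = findMoved_alt o n := by
  unfold findMoved findMoved_alt
  by_cases h0 : o.length ≠ n.length
  · rw [if_pos h0, if_pos h0]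
  · rw [if_neg h0, if_neg h0]
    have hlen : o.length = n.length := of_not_not h0
    by_cases h1 : pvDiffIdx o n = []
    · rw [if_pos h1, if_pos h1]
    · rw [if_neg h1, if_neg h1]
      simp only []
      -- name the first and last differing indices
      have hdg : pvDiffIdx o n = pvDg o n 0 := pvDg_zero o n
      have hsort : (pvDiffIdx o n).Pairwise (· < ·) := hdg ▸ pvDg_pairwise o n 0
      have hhm : (pvDiffIdx o n).head h1 ∈ pvDiffIdx o n := List.head_mem h1
      have hlm : (pvDiffIdx o n).getLast h1 ∈ pvDiffIdx o n := List.getLast_mem h1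
      have hhm' : (pvDiffIdx o n).head h1 ∈ pvDg o n 0 := by rw [← hdg]; exact hhm
      have hlm' : (pvDiffIdx o n).getLast h1 ∈ pvDg o n 0 := by rw [← hdg]; exact hlm
      obtain ⟨a, hao, han, hae, -⟩ := mem_pvDg.mp hhm'
      obtain ⟨b, hbo, hbn, hbe, -⟩ := mem_pvDg.mp hlm'
      have hae' : (pvDiffIdx o n).head h1 = (a : Int) := by rw [hae]; omega
      have hbe' : (pvDiffIdx o n).getLast h1 = (b : Int) := by rw [hbe]; omega
      have hab : a ≤ b := by
        have := pv_mem_le_getLast hsort hhm h1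
        rw [hae', hbe'] at this
        exact_mod_cast this
      -- everything before a and after b agrees
      have hpre : ∀ i : Nat, i < a → o.getD i 0 = n.getD i 0 := by
        intro i hi
        by_contra hne'
        have hmem : ((i : Int)) ∈ pvDiffIdx o n := by
          rw [hdg]
          exact mem_pvDg.mpr ⟨i, by omega, by omega, by simp, hne'⟩
        have := pv_head_le_mem hsort hmem h1
        rw [hae'] at this
        have : a ≤ i := by exact_mod_cast this
        omega
      have hsuf : ∀ i : Nat, b + 1 ≤ i → i < o.length → o.getD i 0 = n.getD i 0 := by
        intro i hi hio
        by_contra hne'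
        have hmem : ((i : Int)) ∈ pvDiffIdx o n := by
          rw [hdg]
          exact mem_pvDg.mpr ⟨i, by omega, by omega, by simp, hne'⟩
        have := pv_mem_le_getLast hsort hmem h1
        rw [hbe'] at this
        have : i ≤ b := by exact_mod_cast this
        omega
      have pref : o.take a = n.take a := pv_take_eq hlen (by omega) hpre
      have suff : o.drop (b + 1) = n.drop (b + 1) := pv_drop_eq hlen hsuf
      -- normalise the index expressions
      have hold : PySem.List.pyGetD (pvDiffIdx o n) 0 (-1) = (a : Int) := by
        rw [pv_pyGetD_zero_head h1, hae']
      have hnew : PySem.List.pyGetD (pvDiffIdx o n) (-1) (-1) = (b : Int) := by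
        rw [PySem.List.pyGetD_neg_one _ _ h1, hbe']
      rw [hold, hnew]
      -- reduce B's pop/insert to take/drop form
      have hpop : PySem.List.pop? o ((a : Int)) = some (o[a]'hao, o.eraseIdx a) :=
        PySem.List.pop?_natCast o a hao
      have hlenerase : b ≤ (o.eraseIdx a).length := by
        rw [List.length_eraseIdx_of_lt hao]; omega
      have hfwd :
          (match PySem.List.pop? o ((a : Int)) with
            | some (x, rest) => PySem.List.insert rest ((b : Int)) x
            | none => o) =
          (o.eraseIdx a).take b ++ o.getD a 0 :: (o.eraseIdx a).drop b := by
        rw [hpop]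
        simp only [PySem.List.insert_natCast _ b _ hlenerase]
        rw [List.getD_eq_getElem o 0 hao]
      have hpop2 : PySem.List.pop? o ((b : Int)) = some (o[b]'hbo, o.eraseIdx b) :=
        PySem.List.pop?_natCast o b hbo
      have hlenerase2 : a ≤ (o.eraseIdx b).length := by
        rw [List.length_eraseIdx_of_lt hbo]; omega
      have hbwd :
          (match PySem.List.pop? o ((b : Int)) with
            | some (x, rest) => PySem.List.insert rest ((a : Int)) x
            | none => o) =
          (o.eraseIdx b).take a ++ o.getD b 0 :: (o.eraseIdx b).drop a := by
        rw [hpop2]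
        simp only [PySem.List.insert_natCast _ a _ hlenerase2]
        rw [List.getD_eq_getElem o 0 hbo]
      rw [hfwd, hbwd]
      -- reduce A's slices to take/drop form
      have hcast1 : ((a : Int)) + 1 = ((a + 1 : Nat) : Int) := by push_cast; ring
      have hcast2 : ((b : Int)) + 1 = ((b + 1 : Nat) : Int) := by push_cast; ring
      rw [hcast1, hcast2, PySem.List.slice_natCast, PySem.List.slice_natCast,
        PySem.List.slice_natCast, PySem.List.slice_natCast,
        PySem.List.pyGetD_natCast, PySem.List.pyGetD_natCast,
        PySem.List.pyGetD_natCast, PySem.List.pyGetD_natCast]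
      have hsub : b + 1 - (a + 1) = b - a := by omega
      rw [hsub]
      -- the two branch conditions coincide
      rw [if_congr ((pv_move_fwd_iff hlen hab hbo pref suff).symm)  rfl
        (if_congr ((pv_move_bwd_iff hlen hab hbo pref suff).symm) rfl rfl)]

-- ===== VERDICT (by name: the statement is the Claim_ definition above) =====
theorem findMoved_spec : Claim_equal_findMoved := by
  unfold Claim_equal_findMoved
  intro originalList newList _
  unfold Spec_findMoved
  exact pv_main originalList newList
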